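-- pv_equiv track=rewrite | github.com/SergioCBV/Emtech | ANALISIS_02_ BLANCAS_SERGIO/main.py | flujo_de_rutas
-- ===== SOURCE A (Python) =====
-- def flujo_de_rutas(lista_rutas):
--     #Crea una lista con la ruta y los viajes totales de esa ruta, además de ordenarlos
--
--     flujo_rutas=[]
--     ruta_contador=[0,0]
--     for ruta in lista_rutas:
--         contador=lista_rutas.count(ruta)
--         ruta_contador[0]=contador
--         ruta_contador[1]=ruta
--
--         decision=True
--         for flujo in flujo_rutas: #Este ciclo es para evitar que una misma ruta se repita
--             c=flujo[1]!=ruta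
--             if c==False:
--                 decision=False
--
--         if decision==True:
--             flujo_rutas.append(ruta_contador)
--
--         ruta_contador=[0,0]
--
--     flujo_rutas.sort()
--     flujo_rutas.reverse()
--
--     return flujo_rutas
-- ===== SOURCE B (Python) =====
-- def flujo_de_rutas(lista_rutas):
--     # Sort a copy, count each run of equal routes in one linear pass,
--     # then sort the [count, route] pairs descending.
--     pares = []
--     actual = None
--     cuenta = 0
--     for ruta in sorted(lista_rutas):
--         if cuenta > 0 and ruta == actual:
--             cuenta += 1
--         else:
--             if cuenta > 0:
--                 pares.append([cuenta, actual])
--             actual = ruta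
--             cuenta = 1
--     if cuenta > 0:
--         pares.append([cuenta, actual])
--     pares.sort(reverse=True)
--     return pares
-- ===== Notes on version B (the rewrite author's own statement) =====
-- stated objective: faster
-- what changed: Replaced A's per-element list.count plus inner dedup scan (quadratic/cubic) with sort-a-copy, one linear grouping pass over consecutive equal routes, then one descending sort of the pairs.
import Mathlib
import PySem

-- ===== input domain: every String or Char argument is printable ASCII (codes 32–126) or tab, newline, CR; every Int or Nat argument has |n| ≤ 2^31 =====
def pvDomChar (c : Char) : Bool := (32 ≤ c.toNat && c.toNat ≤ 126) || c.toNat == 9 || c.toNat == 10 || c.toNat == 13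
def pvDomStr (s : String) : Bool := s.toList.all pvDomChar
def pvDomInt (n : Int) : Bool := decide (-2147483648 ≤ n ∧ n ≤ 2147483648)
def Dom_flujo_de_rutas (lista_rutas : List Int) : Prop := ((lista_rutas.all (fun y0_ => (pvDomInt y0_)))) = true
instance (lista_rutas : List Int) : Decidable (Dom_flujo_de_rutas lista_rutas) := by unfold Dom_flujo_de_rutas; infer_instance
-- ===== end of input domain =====

-- B replaces A's per-element count + inner dedup scan by sort-then-group-consecutive-runs
-- in one pass, then one descending sort of the pairs (objective: faster).


-- ===== PORT A =====
def flujo_de_rutas (lista_rutas : List Int) : List (List Int) :=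
  let flujo_rutas : List (List Int) :=
    lista_rutas.foldl (fun flujo_rutas ruta =>
      let contador : Int := (PySem.List.count lista_rutas ruta : Int)
      let ruta_contador : List Int := [contador, ruta]
      let decision : Bool :=
        flujo_rutas.foldl (fun decision flujo =>
          let c : Bool := decide (PySem.List.pyGetD flujo 1 0 ≠ ruta)
          if c = false then false else decision) true
      if decision = true then flujo_rutas ++ [ruta_contador] else flujo_rutas) []
  (PySem.List.sorted flujo_rutas (fun x => x) false).reverse

-- ===== PORT B =====
def flujo_de_rutas_alt (lista_rutas : List Int) : List (List Int) :=
  let st :=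
    (PySem.List.sorted lista_rutas (fun x => x) false).foldl
      (fun (st : List (List Int) × Int × Int) ruta =>
        let pares := st.1
        let actual := st.2.1
        let cuenta := st.2.2
        if cuenta > 0 ∧ ruta = actual then (pares, actual, cuenta + 1)
        else ((if cuenta > 0 then pares ++ [[cuenta, actual]] else pares), ruta, (1 : Int)))
      ([], 0, 0)
  let pares := if st.2.2 > 0 then st.1 ++ [[st.2.2, st.2.1]] else st.1
  PySem.List.sorted pares (fun x => x) true

-- ===== PRECONDITION & SPEC =====
def Spec_flujo_de_rutas (lista_rutas : List Int) (out : List (List Int)) : Prop := out = flujo_de_rutas_alt lista_rutas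
instance (lista_rutas : List Int) (out : List (List Int)) : Decidable (Spec_flujo_de_rutas lista_rutas out) := by unfold Spec_flujo_de_rutas; infer_instance

-- ===== CLAIM (what is proved, stated in full; the proofs are below) =====
def Claim_equal_flujo_de_rutas : Prop := ∀ (lista_rutas : List Int), Dom_flujo_de_rutas lista_rutas → Spec_flujo_de_rutas lista_rutas (flujo_de_rutas lista_rutas)

-- ===== LEMMAS AND PROOFS =====

-- the pair A stores for a route
def pvF (l : List Int) (x : Int) : List Int := [((PySem.List.count l x : Nat) : Int), x]

-- first-occurrence dedup of the second argument against already-seen routes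
def pvDD (seen : List Int) : List Int → List Int
  | [] => []
  | x :: xs => if x ∈ seen then pvDD seen xs else x :: pvDD (seen ++ [x]) xs

-- one [run-length, value] pair per maximal run of equal elements
def pvRuns : List Int → List (List Int)
  | [] => []
  | x :: xs =>
    [(1 : Int) + ((xs.takeWhile (fun y => y == x)).length : Int), x]
      :: pvRuns (xs.dropWhile (fun y => y == x))
termination_by s => s.length
decreasing_by
  simp only [List.length_cons]
  exact Nat.lt_succ_of_le (List.length_dropWhile_le _ _)

-- A's loop body, named (definitionally equal to the lambda inside the port of A)
def pvStepA (lista : List Int) : List (List Int) → Int → List (List Int) :=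
  fun flujo_rutas ruta =>
    let contador : Int := (PySem.List.count lista ruta : Int)
    let ruta_contador : List Int := [contador, ruta]
    let decision : Bool :=
      flujo_rutas.foldl (fun decision flujo =>
        let c : Bool := decide (PySem.List.pyGetD flujo 1 0 ≠ ruta)
        if c = false then false else decision) true
    if decision = true then flujo_rutas ++ [ruta_contador] else flujo_rutas

-- B's loop body and final flush, named (definitionally equal to the port of B)
def pvStepB : List (List Int) × Int × Int → Int → List (List Int) × Int × Int :=
  fun st ruta =>
    let pares := st.1
    let actual := st.2.1
    let cuenta := st.2.2
    if cuenta > 0 ∧ ruta = actual then (pares, actual, cuenta + 1)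
    else ((if cuenta > 0 then pares ++ [[cuenta, actual]] else pares), ruta, (1 : Int))

def pvFlush (st : List (List Int) × Int × Int) : List (List Int) :=
  if st.2.2 > 0 then st.1 ++ [[st.2.2, st.2.1]] else st.1

theorem pvDecision_eq (lista : List Int) (ruta : Int) :
    ∀ (l : List Int) (b : Bool),
      (l.map (pvF lista)).foldl (fun decision flujo =>
          if decide (PySem.List.pyGetD flujo 1 0 ≠ ruta) = false then false else decision) b
        = (b && decide (ruta ∉ l)) := by
  intro l
  induction l with
  | nil => intro b; simp
  | cons x xs ih =>
    intro b
    have hget : PySem.List.pyGetD (pvF lista x) 1 0 = x := rfl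
    simp only [List.map_cons, List.foldl_cons, hget, ih]
    by_cases hx : x = ruta
    · simp [hx]
    · have hrx : ruta ≠ x := fun h => hx h.symm
      simp [hx, hrx]

theorem pvStepA_eq (lista : List Int) (l : List Int) (ruta : Int) :
    pvStepA lista (l.map (pvF lista)) ruta
      = if ruta ∈ l then l.map (pvF lista) else (l ++ [ruta]).map (pvF lista) := by
  simp only [pvStepA]
  rw [pvDecision_eq lista ruta l true]
  by_cases hx : ruta ∈ l
  · simp [hx]
  · simp [hx, pvF]

theorem pvFoldA_eq (lista : List Int) :
    ∀ (rest l : List Int),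
      rest.foldl (pvStepA lista) (l.map (pvF lista)) = (l ++ pvDD l rest).map (pvF lista) := by
  intro rest
  induction rest with
  | nil => intro l; simp [pvDD]
  | cons x xs ih =>
    intro l
    simp only [List.foldl_cons, pvStepA_eq]
    by_cases hx : x ∈ l
    · rw [if_pos hx, ih l]
      simp [pvDD, hx]
    · rw [if_neg hx, ih (l ++ [x])]
      simp [pvDD, hx, List.append_assoc]

theorem pvDD_mem : ∀ (xs seen : List Int) (x : Int),
    x ∈ pvDD seen xs ↔ x ∈ xs ∧ x ∉ seen := by
  intro xs
  induction xs with
  | nil => intro seen x; simp [pvDD]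
  | cons y ys ih =>
    intro seen x
    simp only [pvDD]
    by_cases hy : y ∈ seen
    · simp only [if_pos hy, ih, List.mem_cons]
      constructor
      · rintro ⟨h1, h2⟩; exact ⟨Or.inr h1, h2⟩
      · rintro ⟨rfl | h1, h2⟩
        · exact absurd hy h2
        · exact ⟨h1, h2⟩
    · simp only [if_neg hy, List.mem_cons, ih, List.mem_append]
      constructor
      · rintro (rfl | ⟨h1, h2⟩)
        · exact ⟨Or.inl rfl, hy⟩
        · exact ⟨Or.inr h1, fun hc => h2 (Or.inl hc)⟩
      · rintro ⟨rfl | h1, h2⟩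
        · exact Or.inl rfl
        · by_cases hxy : x = y
          · exact Or.inl hxy
          · exact Or.inr ⟨h1, by simp [h2, hxy]⟩

theorem pvDD_nodup : ∀ (xs seen : List Int), seen.Nodup → (seen ++ pvDD seen xs).Nodup := by
  intro xs
  induction xs with
  | nil => intro seen h; simpa [pvDD]
  | cons y ys ih =>
    intro seen h
    simp only [pvDD]
    by_cases hy : y ∈ seen
    · simpa [hy] using ih seen h
    · have hdisj : seen.Disjoint [y] := by
        intro a ha hb
        rw [List.mem_singleton] at hb
        exact hy (hb ▸ ha)
      have h2 : (seen ++ [y]).Nodup := List.Nodup.append h (List.nodup_singleton y) hdisj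
      have := ih (seen ++ [y]) h2
      simpa [hy, List.append_assoc] using this

theorem pvFoldB_run : ∀ (s : List Int) (a : Int) (c : Int) (pares : List (List Int)), 0 < c →
    pvFlush (s.foldl pvStepB (pares, a, c))
      = pares ++ [[c + ((s.takeWhile (fun y => y == a)).length : Int), a]]
          ++ pvRuns (s.dropWhile (fun y => y == a)) := by
  intro s
  induction s with
  | nil => intro a c pares hc; simp [pvFlush, pvRuns, hc]
  | cons x xs ih =>
    intro a c pares hc
    by_cases hx : x = a
    · subst hx
      simp only [List.foldl_cons, pvStepB]
      rw [if_pos (show c > 0 ∧ True from ⟨hc, trivial⟩)]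
      rw [ih x (c + 1) pares (by omega)]
      have htw : (x :: xs).takeWhile (fun y => y == x) = x :: xs.takeWhile (fun y => y == x) := by
        simp
      have hdw : (x :: xs).dropWhile (fun y => y == x) = xs.dropWhile (fun y => y == x) := by
        simp
      have hnum : c + (((xs.takeWhile (fun y => y == x)).length + 1 : Nat) : Int)
          = c + 1 + ((xs.takeWhile (fun y => y == x)).length : Int) := by
        push_cast
        ring
      rw [htw, hdw, List.length_cons, hnum]
    · simp only [List.foldl_cons, pvStepB]
      rw [if_neg (by simp [hx]), if_pos hc, ih x 1 _ (by omega)]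
      have hbx : (x == a) = false := by simp [hx]
      rw [List.takeWhile_cons, List.dropWhile_cons]
      simp [hbx, pvRuns, List.append_assoc]

theorem pvFoldB_eq (s : List Int) :
    pvFlush (s.foldl pvStepB ([], 0, 0)) = pvRuns s := by
  cases s with
  | nil => simp [pvFlush, pvRuns]
  | cons x xs =>
    simp only [List.foldl_cons, pvStepB]
    rw [if_neg (by simp), if_neg (by norm_num)]
    rw [pvFoldB_run xs x 1 [] (by omega)]
    simp [pvRuns]

-- decomposition facts for a ≤-sorted list
theorem pvSorted_decomp (x : Int) (xs : List Int) (h : (x :: xs).Pairwise (· ≤ ·)) :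
    (∀ y ∈ xs.takeWhile (fun y => y == x), y = x) ∧
    x ∉ xs.dropWhile (fun y => y == x) ∧
    (xs.dropWhile (fun y => y == x)).Pairwise (· ≤ ·) := by
  have hsub : (xs.dropWhile (fun y => y == x)).Sublist xs := List.dropWhile_sublist _
  have hxs : xs.Pairwise (· ≤ ·) := (List.pairwise_cons.mp h).2
  have hxle : ∀ y ∈ xs, x ≤ y := (List.pairwise_cons.mp h).1
  refine ⟨fun y hy => by simpa using List.mem_takeWhile_imp hy, ?_, hxs.sublist hsub⟩
  cases hd : xs.dropWhile (fun y => y == x) with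
  | nil => simp
  | cons z d =>
    have hz : ¬ (z == x) = true := by
      have := List.head?_dropWhile_not (fun y => y == x) xs
      rw [hd] at this
      simpa using this
    have hz' : z ≠ x := by simpa using hz
    have hzxs : z ∈ xs := (hd ▸ hsub).mem (List.mem_cons_self ..)
    have hzd : (z :: d).Pairwise (· ≤ ·) := hxs.sublist (hd ▸ hsub)
    intro hmem
    rcases List.mem_cons.mp hmem with heq | hmem
    · exact hz' heq.symm
    · have h1 : z ≤ x := (List.pairwise_cons.mp hzd).1 x hmem
      exact hz' (le_antisymm h1 (hxle z hzxs))

theorem pvRuns_mem : ∀ (s : List Int), s.Pairwise (· ≤ ·) →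
    ∀ p, p ∈ pvRuns s ↔ ∃ y ∈ s, p = [((List.count y s : Nat) : Int), y] := by
  intro s
  induction s using pvRuns.induct with
  | case1 => intro _ p; simp [pvRuns]
  | case2 x xs ih =>
    intro h p
    obtain ⟨ht, hxd, hd⟩ := pvSorted_decomp x xs h
    have hsplit : xs = xs.takeWhile (fun y => y == x) ++ xs.dropWhile (fun y => y == x) :=
      (List.takeWhile_append_dropWhile).symm
    have hcx : List.count x (x :: xs) = 1 + (xs.takeWhile (fun y => y == x)).length := by
      rw [List.count_cons_self]
      conv_lhs => rw [hsplit]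
      rw [List.count_append]
      have h1 : List.count x (xs.takeWhile (fun y => y == x))
          = (xs.takeWhile (fun y => y == x)).length :=
        List.count_eq_length.mpr (fun y hy => (ht y hy).symm)
      have h2 : List.count x (xs.dropWhile (fun y => y == x)) = 0 :=
        List.count_eq_zero.mpr hxd
      omega
    have hcy : ∀ y ∈ xs.dropWhile (fun y => y == x),
        List.count y (x :: xs) = List.count y (xs.dropWhile (fun y => y == x)) := by
      intro y hy
      have hyx : x ≠ y := fun hc => hxd (hc ▸ hy)
      rw [List.count_cons_of_ne hyx]
      conv_lhs => rw [hsplit]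
      rw [List.count_append]
      have h1 : List.count y (xs.takeWhile (fun y => y == x)) = 0 :=
        List.count_eq_zero.mpr (fun hc => hyx (ht y hc).symm)
      omega
    have hhead : [(1 : Int) + ((xs.takeWhile (fun y => y == x)).length : Int), x]
        = [((List.count x (x :: xs) : Nat) : Int), x] := by
      rw [hcx]; push_cast; ring_nf
    simp only [pvRuns, List.mem_cons]
    constructor
    · rintro (rfl | hp)
      · exact ⟨x, Or.inl rfl, hhead⟩
      · obtain ⟨y, hy, rfl⟩ := (ih hd _).mp hp
        refine ⟨y, ?_, by rw [hcy y hy]⟩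
        exact Or.inr ((List.dropWhile_sublist _).mem hy)
    · rintro ⟨y, hy, rfl⟩
      rcases hy with rfl | hy
      · exact Or.inl hhead.symm
      · rw [hsplit] at hy
        rcases List.mem_append.mp hy with hy | hy
        · have := ht y hy; subst this
          exact Or.inl hhead.symm
        · right
          rw [hcy y hy]
          exact (ih hd _).mpr ⟨y, hy, rfl⟩

theorem pvRuns_nodup : ∀ (s : List Int), s.Pairwise (· ≤ ·) → (pvRuns s).Nodup := by
  intro s
  induction s using pvRuns.induct with
  | case1 => intro _; simp [pvRuns]
  | case2 x xs ih =>
    intro h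
    obtain ⟨ht, hxd, hd⟩ := pvSorted_decomp x xs h
    simp only [pvRuns, List.nodup_cons]
    refine ⟨fun hmem => ?_, ih hd⟩
    obtain ⟨y, hy, heq⟩ := (pvRuns_mem _ hd _).mp hmem
    have hxy : x = y := by simpa using congrArg (fun l => l.getLast?) heq
    exact hxd (hxy ▸ hy)

theorem pvF_injective (l : List Int) : Function.Injective (pvF l) := by
  intro a b hab
  simpa [pvF] using congrArg (fun t => t.getLast?) hab

-- the two elaborations of the lexicographic order on List Int are the same instance
theorem pvSorted_inst (xs : List (List Int)) (rev : Bool) :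
    @PySem.List.sorted _ _ List.instLT (fun a b => a.decidableLT b) xs (fun x => x) rev
      = @PySem.List.sorted _ _ List.instLinearOrder.toLT LinearOrder.toDecidableLT xs
          (fun x => x) rev := by
  congr 1

-- ===== VERDICT (by name: the statement is the Claim_ definition above) =====
theorem flujo_de_rutas_spec : Claim_equal_flujo_de_rutas := by
  intro lista _
  unfold Spec_flujo_de_rutas
  have hA : flujo_de_rutas lista
      = (PySem.List.sorted (lista.foldl (pvStepA lista) []) (fun x => x) false).reverse := rfl
  have hB : flujo_de_rutas_alt lista
      = PySem.List.sorted
          (pvFlush ((PySem.List.sorted lista (fun x => x) false).foldl pvStepB ([], 0, 0)))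
          (fun x => x) true := rfl
  rw [hA, hB, pvFoldB_eq]
  have hA2 : lista.foldl (pvStepA lista) [] = (pvDD [] lista).map (pvF lista) := by
    simpa using pvFoldA_eq lista lista []
  rw [hA2]
  set s := PySem.List.sorted lista (fun x => x) false with hs
  have hsperm : s.Perm lista := PySem.List.sorted_perm lista _ false
  have hsord : s.Pairwise (· ≤ ·) := PySem.List.sorted_pairwise lista (fun x => x)
  have hcount : ∀ y, List.count y s = List.count y lista := fun y => hsperm.count_eq y
  have hPA_nodup : ((pvDD [] lista).map (pvF lista)).Nodup :=
    List.Nodup.map (pvF_injective lista) (by simpa using pvDD_nodup lista [] List.nodup_nil)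
  have hPB_nodup : (pvRuns s).Nodup := pvRuns_nodup s hsord
  have hperm : (pvRuns s).Perm ((pvDD [] lista).map (pvF lista)) := by
    rw [List.perm_ext_iff_of_nodup hPB_nodup hPA_nodup]
    intro p
    rw [pvRuns_mem s hsord p]
    simp only [List.mem_map]
    constructor
    · rintro ⟨y, hy, rfl⟩
      refine ⟨y, (pvDD_mem lista [] y).mpr ⟨hsperm.mem_iff.mp hy, by simp⟩, ?_⟩
      simp [pvF, PySem.List.count_eq, hcount y]
    · rintro ⟨y, hy, rfl⟩
      have hyl : y ∈ lista := ((pvDD_mem lista [] y).mp hy).1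
      exact ⟨y, hsperm.mem_iff.mpr hyl, by simp [pvF, PySem.List.count_eq, hcount y]⟩
  set L := PySem.List.sorted ((pvDD [] lista).map (pvF lista)) (fun x => x) false with hL
  have hLperm : L.Perm ((pvDD [] lista).map (pvF lista)) := PySem.List.sorted_perm _ _ false
  have hLle : L.Pairwise (fun a b => a ≤ b) := by
    rw [hL, pvSorted_inst]
    exact PySem.List.sorted_pairwise ((pvDD [] lista).map (pvF lista)) (fun x => x)
  have hLnd : L.Nodup := hLperm.nodup_iff.mpr hPA_nodup
  have hLlt : L.Pairwise (fun a b => a < b) :=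
    (hLle.and hLnd).imp (fun hab => lt_of_le_of_ne hab.1 hab.2)
  have hfinal : PySem.List.sorted (pvRuns s) (fun x => x) true = L.reverse := by
    rw [pvSorted_inst]
    apply PySem.List.sorted_rev_eq_of_perm_of_pairwise_gt
    · exact (L.reverse_perm).trans (hLperm.trans hperm.symm)
    · exact List.pairwise_reverse.mpr hLlt
  exact hfinal.symm
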